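-- pv_equiv track=rewrite | github.com/Karyaustuncelik/enterprise-inventory-portal | backend/main.py | _escape_ldap_value
-- ===== SOURCE A (Python) =====
-- def _escape_ldap_value(value: str) -> str:
--     replacements = {
--         "\\": r"\5c",
--         "*": r"\2a",
--         "(": r"\28",
--         ")": r"\29",
--         "\0": r"\00",
--     }
--     escaped = []
--     for char in value:
--         escaped.append(replacements.get(char, char))
--     return "".join(escaped)
-- ===== SOURCE B (Python) =====
-- def _escape_ldap_value(value: str) -> str:
--     value = value.replace("\\", r"\5c")
--     value = value.replace("*", r"\2a")
--     value = value.replace("(", r"\28")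
--     value = value.replace(")", r"\29")
--     return value.replace("\0", r"\00")
-- ===== Notes on version B (the rewrite author's own statement) =====
-- stated objective: idiomatic
-- what changed: Replaced the per-character dict-lookup loop with a chain of str.replace calls (backslash first so inserted escapes are never re-escaped); no dict, list or explicit loop remains.
import Mathlib
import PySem

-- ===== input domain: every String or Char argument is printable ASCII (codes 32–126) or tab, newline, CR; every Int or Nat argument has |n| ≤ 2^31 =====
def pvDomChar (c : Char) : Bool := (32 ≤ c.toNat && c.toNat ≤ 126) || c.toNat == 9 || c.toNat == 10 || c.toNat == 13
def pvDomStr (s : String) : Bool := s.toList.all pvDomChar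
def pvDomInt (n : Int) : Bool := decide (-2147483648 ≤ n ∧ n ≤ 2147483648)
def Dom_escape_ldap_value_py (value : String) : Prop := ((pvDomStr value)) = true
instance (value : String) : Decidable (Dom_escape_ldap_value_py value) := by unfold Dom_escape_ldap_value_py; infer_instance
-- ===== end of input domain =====

-- B rewrites A's per-character dict-lookup loop as a chain of str.replace calls (backslash first); same values, idiomatic.

-- ===== PORT A =====
def escape_ldap_value_py (value : String) : String :=
  let replacements : PySem.Dict String String :=
    PySem.Dict.ofList [("\\", "\\5c"), ("*", "\\2a"), ("(", "\\28"), (")", "\\29"), ("\x00", "\\00")]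
  let escaped : List String :=
    value.toList.foldl (fun escaped char =>
      escaped ++ [replacements.getD (String.singleton char) (String.singleton char)]) []
  PySem.Str.join "" escaped

-- ===== PORT B =====
def escape_ldap_value_py_alt (value : String) : String :=
  let v1 := PySem.Str.replace value "\\" "\\5c"
  let v2 := PySem.Str.replace v1 "*" "\\2a"
  let v3 := PySem.Str.replace v2 "(" "\\28"
  let v4 := PySem.Str.replace v3 ")" "\\29"
  PySem.Str.replace v4 "\x00" "\\00"

-- ===== PRECONDITION & SPEC =====
def Spec_escape_ldap_value_py (value : String) (out : String) : Prop := out = escape_ldap_value_py_alt value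
instance (value : String) (out : String) : Decidable (Spec_escape_ldap_value_py value out) := by unfold Spec_escape_ldap_value_py; infer_instance

-- ===== CLAIM (what is proved, stated in full; the proofs are below) =====
def Claim_equal_escape_ldap_value_py : Prop := ∀ (value : String), Dom_escape_ldap_value_py value → Spec_escape_ldap_value_py value (escape_ldap_value_py value)

-- ===== LEMMAS AND PROOFS =====

-- the per-character escaping function both programs implement
def pvEsc (c : Char) : List Char :=
  if c = '\\' then ['\\', '5', 'c']
  else if c = '*' then ['\\', '2', 'a']
  else if c = '(' then ['\\', '2', '8']
  else if c = ')' then ['\\', '2', '9']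
  else if c = '\x00' then ['\\', '0', '0']
  else [c]

-- single-character replacement, per character
def pvRep (o : Char) (new : List Char) (c : Char) : List Char :=
  if c = o then new else [c]

theorem replace_go_single (o : Char) (new : List Char) :
    ∀ (fuel : Nat) (l acc : List Char), l.length ≤ fuel →
      PySem.Chars.replace.go [o] new fuel l acc =
        acc.reverse ++ l.flatMap (pvRep o new) := by
  intro fuel
  induction fuel with
  | zero =>
    intro l acc h
    have : l = [] := List.eq_nil_of_length_eq_zero (Nat.le_zero.mp h)
    subst this
    simp [PySem.Chars.replace.go]
  | succ n ih =>
    intro l acc h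
    cases l with
    | nil => simp [PySem.Chars.replace.go]
    | cons c t =>
      simp only [PySem.Chars.replace.go, List.isPrefixOf]
      by_cases hc : o = c
      · subst hc
        simp only [beq_self_eq_true, Bool.true_and, if_true]
        have hdrop : List.drop [o].length (o :: t) = t := by simp
        rw [hdrop, ih t (new.reverse ++ acc) (Nat.lt_succ_iff.mp (by simpa using h))]
        simp [pvRep]
      · have hb : (o == c) = false := beq_eq_false_iff_ne.mpr hc
        simp only [hb, Bool.false_and, if_neg Bool.false_ne_true]
        rw [ih t (c :: acc) (Nat.lt_succ_iff.mp (by simpa using h))]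
        simp [pvRep, Ne.symm hc]

theorem replace_single (s : List Char) (o : Char) (new : List Char) :
    PySem.Chars.replace s [o] new = s.flatMap (pvRep o new) := by
  rw [PySem.Chars.replace, if_neg (by simp)]
  exact replace_go_single o new s.length s [] (le_refl _)

theorem str_replace_single (s : String) (old : String) (o : Char) (new : String)
    (h : old.toList = [o]) :
    (PySem.Str.replace s old new).toList =
      s.toList.flatMap (pvRep o new.toList) := by
  rw [PySem.Str.replace, h, replace_single]
  simp

-- getD on A's five-entry dict, by cases on the character
theorem getD_repl (c : Char) :
    (PySem.Dict.ofList [("\\", "\\5c"), ("*", "\\2a"), ("(", "\\28"), (")", "\\29"), ("\x00", "\\00")]).getD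
      (String.singleton c) (String.singleton c) = String.ofList (pvEsc c) := by
  by_cases h1 : c = '\\'
  · subst h1; decide
  by_cases h2 : c = '*'
  · subst h2; decide
  by_cases h3 : c = '('
  · subst h3; decide
  by_cases h4 : c = ')'
  · subst h4; decide
  by_cases h5 : c = '\x00'
  · subst h5; decide
  · have hsing : ∀ d : Char, (String.singleton d == String.singleton c) = (d == c) := by
      intro d
      by_cases h : d = c
      · simp [h]
      · have h2' : String.singleton d ≠ String.singleton c := by
          intro he
          exact h (by simpa using congrArg String.toList he)
        simp [beq_eq_false_iff_ne.mpr h, beq_eq_false_iff_ne.mpr h2']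
    have hd : PySem.Dict.ofList [(("\\" : String), ("\\5c" : String)), ("*", "\\2a"), ("(", "\\28"), (")", "\\29"), ("\x00", "\\00")]
        = PySem.Dict.mk [("\\", "\\5c"), ("*", "\\2a"), ("(", "\\28"), (")", "\\29"), ("\x00", "\\00")] := by decide
    rw [hd, PySem.Dict.getD_eq_get?_getD]
    have k1 : ("\\" : String) = String.singleton '\\' := rfl
    have k2 : ("*" : String) = String.singleton '*' := rfl
    have k3 : ("(" : String) = String.singleton '(' := rfl
    have k4 : (")" : String) = String.singleton ')' := rfl
    have k5 : ("\x00" : String) = String.singleton '\x00' := rfl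
    rw [show String.ofList (pvEsc c) = String.singleton c by
      simp [pvEsc, h1, h2, h3, h4, h5]; rfl]
    simp only [PySem.Dict.get?_mk_cons, k1, k2, k3, k4, k5, hsing,
      beq_eq_false_iff_ne.mpr (Ne.symm h1), beq_eq_false_iff_ne.mpr (Ne.symm h2),
      beq_eq_false_iff_ne.mpr (Ne.symm h3), beq_eq_false_iff_ne.mpr (Ne.symm h4),
      beq_eq_false_iff_ne.mpr (Ne.symm h5), if_neg Bool.false_ne_true]
    simp [PySem.Dict.get?]

theorem flatten_map_singleton {α β : Type} (f : α → List β) : ∀ (l : List α), (l.map (fun x => [f x])).flatten = l.map f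
  | [] => by simp
  | x :: t => by simp [flatten_map_singleton f t]

-- "".join at the Chars level concatenates
theorem join_empty_flatten : ∀ (xs : List (List Char)), PySem.Chars.join [] xs = xs.flatten := by
  intro xs
  induction xs with
  | nil => simp [PySem.Chars.join_nil]
  | cons a rest ih =>
    cases rest with
    | nil => simp [PySem.Chars.join_singleton]
    | cons b r => rw [PySem.Chars.join_cons_cons, ih]; simp

-- A computes the flatMap of pvEsc
theorem A_eq (value : String) :
    (escape_ldap_value_py value).toList = value.toList.flatMap pvEsc := by
  rw [escape_ldap_value_py]
  have key : ∀ (l : List Char) (acc : List String),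
      (PySem.Str.join ""
        (l.foldl (fun escaped char =>
          escaped ++ [(PySem.Dict.ofList [("\\", "\\5c"), ("*", "\\2a"), ("(", "\\28"), (")", "\\29"), ("\x00", "\\00")]).getD
            (String.singleton char) (String.singleton char)]) acc)).toList =
      (acc.map String.toList).flatten ++ l.flatMap pvEsc := by
    intro l
    induction l with
    | nil =>
      intro acc
      simp [PySem.Str.join, join_empty_flatten]
    | cons c t ih =>
      intro acc
      simp only [List.foldl_cons, getD_repl, List.flatMap_cons]
      simp [join_empty_flatten, Function.comp_def, List.flatMap_def, flatten_map_singleton]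
  simpa using key value.toList []

-- collapsing the five single-character replacement passes into one pass of pvEsc
theorem head_eq (c : Char) :
    ((((pvRep '\\' ['\\','5','c'] c).flatMap (pvRep '*' ['\\','2','a'])).flatMap
        (pvRep '(' ['\\','2','8'])).flatMap (pvRep ')' ['\\','2','9'])).flatMap
        (pvRep '\x00' ['\\','0','0']) = pvEsc c := by
  by_cases h1 : c = '\\'
  · subst h1; decide
  by_cases h2 : c = '*'
  · subst h2; decide
  by_cases h3 : c = '('
  · subst h3; decide
  by_cases h4 : c = ')'
  · subst h4; decide
  by_cases h5 : c = '\x00'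
  · subst h5; decide
  · simp [pvRep, pvEsc, h1, h2, h3, h4, h5]

theorem chain_eq (l : List Char) :
    ((((l.flatMap (pvRep '\\' ['\\','5','c'])).flatMap (pvRep '*' ['\\','2','a'])).flatMap
        (pvRep '(' ['\\','2','8'])).flatMap (pvRep ')' ['\\','2','9'])).flatMap
        (pvRep '\x00' ['\\','0','0']) = l.flatMap pvEsc := by
  induction l with
  | nil => simp
  | cons c t ih =>
    simp only [List.flatMap_cons, List.flatMap_append]
    rw [ih, head_eq]

-- B computes the flatMap of pvEsc
theorem B_eq (value : String) :
    (escape_ldap_value_py_alt value).toList = value.toList.flatMap pvEsc := by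
  rw [escape_ldap_value_py_alt]
  rw [str_replace_single _ _ '\x00' _ rfl, str_replace_single _ _ ')' _ rfl,
    str_replace_single _ _ '(' _ rfl, str_replace_single _ _ '*' _ rfl,
    str_replace_single _ _ '\\' _ rfl]
  exact chain_eq value.toList

-- ===== VERDICT =====
theorem escape_ldap_value_py_spec : Claim_equal_escape_ldap_value_py := by
  intro value _
  unfold Spec_escape_ldap_value_py
  apply String.toList_injective
  rw [A_eq, B_eq]
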